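-- pv_equiv track=rewrite | github.com/silvio-blip/ai_dietAssisstant-main | src/health_considerations.py | adjust_for_health_conditions
-- ===== SOURCE A (Python) =====
-- def adjust_for_health_conditions(diet_plan, health_conditions):
--     if not health_conditions:
--         return diet_plan
--
--     # Convert health conditions to lowercase for case-insensitive comparison
--     health_conditions = [condition.lower() for condition in health_conditions]
--     adjusted_plan = []
--
--     for food in diet_plan:
--         should_include = True
--
--         # Adjust for diabetes - allow moderate sugar
--         if 'diabetes' in health_conditions and food.get('sugar', 0) > 15:
--             should_include = False
--
--         # Adjust for high cholesterol - allow moderate fat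
--         if 'high cholesterol' in health_conditions and food.get('fat', 0) > 25:
--             should_include = False
--
--         if should_include:
--             adjusted_plan.append(food)
--
--     # Ensure we have at least 2 meals in the plan
--     if len(adjusted_plan) < 2:
--         # Add back the healthiest options from removed foods
--         removed_foods = [f for f in diet_plan if f not in adjusted_plan]
--         removed_foods.sort(key=lambda x: (x.get('sugar', 0), x.get('fat', 0)))
--
--         while len(adjusted_plan) < 2 and removed_foods:
--             adjusted_plan.append(removed_foods.pop(0))
--
--     return adjusted_plan
-- ===== SOURCE B (Python) =====
-- def adjust_for_health_conditions(diet_plan, health_conditions):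
--     if not health_conditions:
--         return diet_plan
--
--     conditions = [c.lower() for c in health_conditions]
--     diabetes = 'diabetes' in conditions
--     cholesterol = 'high cholesterol' in conditions
--
--     # Rank: foods that pass the health checks rank (0, (0, 0)) and, by sort
--     # stability, stay in plan order at the front; rejected foods rank after
--     # them, ordered by (sugar, fat).
--     def rank(food):
--         if (diabetes and food.get('sugar', 0) > 15) or \
--            (cholesterol and food.get('fat', 0) > 25):
--             return (1, (food.get('sugar', 0), food.get('fat', 0)))
--         return (0, (0, 0))
--
--     ordered = sorted(diet_plan, key=rank)
--     kept = sum(1 for food in diet_plan if rank(food)[0] == 0)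
--     return ordered[:max(kept, min(2, len(diet_plan)))]
-- ===== Notes on version B (the rewrite author's own statement) =====
-- stated objective: faster
-- what changed: B replaces A's filter loop, membership-based removed-foods recomputation (the quadratic `f not in adjusted_plan` scan) and pop(0) backfill loop by a single stable decorate-sort of the whole plan (kept foods rank (0,(0,0)) and stay first in plan order, rejected foods rank by (1,(sugar,fat))) followed by taking one prefix of length max(kept, min(2, len(plan))).
import Mathlib
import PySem

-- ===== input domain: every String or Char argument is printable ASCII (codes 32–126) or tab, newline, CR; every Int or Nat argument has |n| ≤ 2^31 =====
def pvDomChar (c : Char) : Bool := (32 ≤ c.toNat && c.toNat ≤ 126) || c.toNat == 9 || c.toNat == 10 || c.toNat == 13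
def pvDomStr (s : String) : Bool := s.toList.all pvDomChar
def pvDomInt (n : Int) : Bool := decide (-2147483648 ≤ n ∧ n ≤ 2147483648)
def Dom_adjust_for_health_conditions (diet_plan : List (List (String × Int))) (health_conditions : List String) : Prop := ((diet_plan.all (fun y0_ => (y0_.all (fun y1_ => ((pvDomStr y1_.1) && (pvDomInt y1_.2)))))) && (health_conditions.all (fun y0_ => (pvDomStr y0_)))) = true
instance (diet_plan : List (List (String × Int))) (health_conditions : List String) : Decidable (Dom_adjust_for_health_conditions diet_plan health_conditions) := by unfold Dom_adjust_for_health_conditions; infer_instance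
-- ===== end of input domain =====

-- B replaces A's filter loop + membership-based removed recomputation + pop(0) backfill by ONE stable
-- decorate-sort of the whole plan and a single prefix take; alternative algorithm, same output.

-- ===== PORT A =====
-- food.get(k, 0) on the dict represented by the association list `food` (Python dict: later keys overwrite)
def pvGetv (food : List (String × Int)) (k : String) : Int :=
  (PySem.Dict.ofList food).getD k 0

-- Python `==` on two dicts (order-insensitive: same keys, same values); used by A's `f not in adjusted_plan`
def pyDictEq (f g : List (String × Int)) : Bool :=
  let d := PySem.Dict.ofList f
  let e := PySem.Dict.ofList g
  d.items.all (fun kv => e.get? kv.1 == some kv.2) && e.items.all (fun kv => d.get? kv.1 == some kv.2)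

-- A's `while len(adjusted_plan) < 2 and removed_foods: adjusted_plan.append(removed_foods.pop(0))`
def pvFill (adj : List (List (String × Int))) (rem : List (List (String × Int))) : List (List (String × Int)) :=
  match rem with
  | [] => adj
  | r :: rs => if adj.length < 2 then pvFill (adj ++ [r]) rs else adj

def adjust_for_health_conditions (diet_plan : List (List (String × Int))) (health_conditions : List String) : List (List (String × Int)) :=
  if health_conditions = [] then diet_plan
  else
    let hcl := health_conditions.map PySem.Str.lower
    let adjusted_plan := diet_plan.foldl (fun acc food =>
      let should_include0 := true
      let should_include1 :=
        if hcl.contains "diabetes" && decide (pvGetv food "sugar" > 15) then false else should_include0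
      let should_include2 :=
        if hcl.contains "high cholesterol" && decide (pvGetv food "fat" > 25) then false else should_include1
      if should_include2 then acc ++ [food] else acc) []
    if adjusted_plan.length < 2 then
      let removed_foods := diet_plan.filter (fun f => !(adjusted_plan.any (fun g => pyDictEq f g)))
      let removed_sorted := PySem.List.sorted2 removed_foods (fun x => pvGetv x "sugar") (fun x => pvGetv x "fat")
      pvFill adjusted_plan removed_sorted
    else adjusted_plan

-- ===== PORT B =====
-- B's rank(food): rejected foods rank (1, (sugar, fat)), kept foods rank (0, (0, 0))
def pvRank (diabetes cholesterol : Bool) (food : List (String × Int)) : Int × (Int × Int) :=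
  if (diabetes && decide (pvGetv food "sugar" > 15)) || (cholesterol && decide (pvGetv food "fat" > 25))
  then (1, (pvGetv food "sugar", pvGetv food "fat"))
  else (0, (0, 0))

def adjust_for_health_conditions_alt (diet_plan : List (List (String × Int))) (health_conditions : List String) : List (List (String × Int)) :=
  if health_conditions = [] then diet_plan
  else
    let conditions := health_conditions.map PySem.Str.lower
    let diabetes := conditions.contains "diabetes"
    let cholesterol := conditions.contains "high cholesterol"
    -- sorted(diet_plan, key=rank): Python's lexicographic tuple key, ported with sorted2 and a Lex pair
    let ordered := PySem.List.sorted2 diet_plan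
      (fun f => (pvRank diabetes cholesterol f).1)
      (fun f => toLex (pvRank diabetes cholesterol f).2)
    let kept := (diet_plan.map (fun f => if (pvRank diabetes cholesterol f).1 == 0 then (1 : Int) else 0)).sum
    PySem.List.slice ordered none (some (max kept (min 2 (diet_plan.length : Int))))

-- ===== PRECONDITION & SPEC =====
def Spec_adjust_for_health_conditions (diet_plan : List (List (String × Int))) (health_conditions : List String) (out : List (List (String × Int))) : Prop := out = adjust_for_health_conditions_alt diet_plan health_conditions
instance (diet_plan : List (List (String × Int))) (health_conditions : List String) (out : List (List (String × Int))) : Decidable (Spec_adjust_for_health_conditions diet_plan health_conditions out) := by unfold Spec_adjust_for_health_conditions; infer_instance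

-- ===== CLAIM (what is proved, stated in full; the proofs are below) =====
def Claim_equal_adjust_for_health_conditions : Prop := ∀ (diet_plan : List (List (String × Int))) (health_conditions : List String), Dom_adjust_for_health_conditions diet_plan health_conditions → Spec_adjust_for_health_conditions diet_plan health_conditions (adjust_for_health_conditions diet_plan health_conditions)

-- ===== LEMMAS AND PROOFS =====

theorem pyDictEq_refl (f : List (String × Int)) : pyDictEq f f = true := by
  simp only [pyDictEq, Bool.and_eq_true, List.all_eq_true]
  constructor <;>
  · rintro ⟨k, v⟩ hkv
    rw [PySem.Dict.get?_of_mem_items _ hkv (PySem.Dict.nodup_keys_ofList f)]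
    exact beq_self_eq_true _

theorem pyDictEq_getv {f g : List (String × Int)} (h : pyDictEq f g = true) (k : String) :
    pvGetv f k = pvGetv g k := by
  simp only [pyDictEq, Bool.and_eq_true, List.all_eq_true] at h
  obtain ⟨h1, h2⟩ := h
  have hget : (PySem.Dict.ofList f).get? k = (PySem.Dict.ofList g).get? k := by
    cases hf : (PySem.Dict.ofList f).get? k with
    | some v =>
      have := h1 (k, v) (PySem.Dict.mem_items_of_get?_eq_some _ hf)
      exact (beq_iff_eq.mp this).symm
    | none =>
      cases hg : (PySem.Dict.ofList g).get? k with
      | none => rfl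
      | some w =>
        have := h2 (k, w) (PySem.Dict.mem_items_of_get?_eq_some _ hg)
        simp only [beq_iff_eq] at this
        rw [hf] at this
        exact absurd this (by simp)
  show ((PySem.Dict.ofList f).get? k).getD 0 = ((PySem.Dict.ofList g).get? k).getD 0
  rw [hget]

-- A's two stacked `should_include` updates are a single filter
theorem loopA_eq (c1 c2 : List (String × Int) → Bool) (l : List (List (String × Int))) :
    l.foldl (fun acc food =>
        if (if c2 food then false else if c1 food then false else true) then acc ++ [food] else acc) []
      = l.filter (fun f => !(c1 f || c2 f)) := by
  have hfun : (fun (acc : List (List (String × Int))) food =>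
      if (if c2 food then false else if c1 food then false else true) then acc ++ [food] else acc)
      = (fun acc food => if (fun f => !(c1 f || c2 f)) food then acc ++ [id food] else acc) := by
    funext acc food
    cases h1 : c1 food <;> cases h2 : c2 food <;> simp [h1, h2]
  rw [hfun, PySem.List.foldl_append_if (fun f => !(c1 f || c2 f)) id l []]
  simp

-- A's membership-based removed list is the bad-filter
theorem removed_eq (p : List (String × Int) → Bool)
    (hcong : ∀ f g, pyDictEq f g = true → p f = p g) (l : List (List (String × Int))) :
    l.filter (fun f => !((l.filter (fun f => !(p f))).any (fun g => pyDictEq f g)))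
      = l.filter p := by
  apply List.filter_congr
  intro f hf
  by_cases hr : p f = true
  · simp only [hr]
    rw [Bool.not_eq_true', List.any_eq_false]
    intro g hg
    rw [List.mem_filter] at hg
    intro hfg
    rw [hcong f g hfg] at hr
    simp [hr] at hg
  · rw [Bool.not_eq_true] at hr
    simp only [hr]
    rw [Bool.not_eq_false', List.any_eq_true]
    exact ⟨f, List.mem_filter.mpr ⟨hf, by simp [hr]⟩, pyDictEq_refl f⟩

-- the top-up while loop is a take
theorem pvFill_eq (rem adj : List (List (String × Int))) :
    pvFill adj rem = adj ++ rem.take (2 - adj.length) := by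
  induction rem generalizing adj with
  | nil => simp [pvFill]
  | cons r rs ih =>
    rw [pvFill]
    by_cases h : adj.length < 2
    · have h2 : 2 - adj.length = (2 - (adj.length + 1)) + 1 := by omega
      rw [if_pos h, ih, h2, List.take_succ_cons]
      simp
    · rw [if_neg h, Nat.sub_eq_zero_of_le (by omega), List.take_zero, List.append_nil]

-- insertion passes over a block it does not go before
theorem insertBy_append_not {α : Type} (before : α → α → Bool) (x : α) (as bs : List α)
    (h : ∀ a ∈ as, before x a = false) :
    PySem.List.insertBy before x (as ++ bs) = as ++ PySem.List.insertBy before x bs := by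
  induction as with
  | nil => rfl
  | cons a as ih =>
    rw [List.cons_append, PySem.List.insertBy, h a (by simp), ih (fun a ha => h a (by simp [ha]))]
    rfl

-- insertion only looks at comparisons with list elements
theorem insertBy_congr {α : Type} (b1 b2 : α → α → Bool) (x : α) (ys : List α)
    (h : ∀ y ∈ ys, b1 x y = b2 x y) :
    PySem.List.insertBy b1 x ys = PySem.List.insertBy b2 x ys := by
  induction ys with
  | nil => rfl
  | cons y ys ih =>
    rw [PySem.List.insertBy, PySem.List.insertBy, h y (by simp)]
    rw [ih (fun y hy => h y (by simp [hy]))]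

-- Python's lexicographic pair comparison as sorted2's two-key comparison
theorem lexlt_eq (a b c d : Int) :
    decide (toLex (a, b) < toLex (c, d)) = (decide (a < c) || (!decide (c < a) && decide (b < d))) := by
  by_cases h1 : a < c <;> by_cases h2 : c < a <;> by_cases h3 : b < d <;>
    simp [Prod.Lex.lt_iff, *] <;> omega

-- snoc step of insertion sort (two-key form)
theorem sorted2_snoc {α κ₂ : Type} [LT κ₂] [DecidableLT κ₂] (l : List α) (x : α)
    (k1 : α → Int) (k2 : α → κ₂) :
    PySem.List.sorted2 (l ++ [x]) k1 k2
      = PySem.List.insertBy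
          (fun a b => decide (k1 a < k1 b) || (!decide (k1 b < k1 a) && decide (k2 a < k2 b)))
          x (PySem.List.sorted2 l k1 k2) := by
  simp [PySem.List.sorted2, List.foldl_append]

-- THE algorithm fact: the decorate-sort splits into "kept in plan order, then rejected sorted by (sugar, fat)"
theorem sortedSplit {α : Type} (bad : α → Bool) (k1 k2 : α → Int) (l : List α) :
    PySem.List.sorted2 l
        (fun f => if bad f then (1 : Int) else 0)
        (fun f => toLex (if bad f then (k1 f, k2 f) else (0, 0)))
      = l.filter (fun f => !bad f) ++ PySem.List.sorted2 (l.filter bad) k1 k2 := by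
  induction l using List.reverseRecOn with
  | nil => simp [PySem.List.sorted2]
  | append_singleton l x ih =>
    rw [sorted2_snoc, ih]
    by_cases hx : bad x = true
    · rw [insertBy_append_not _ _ _ _ (by
        intro a ha
        have hag : bad a = false := by simpa using (List.mem_filter.mp ha).2
        simp [hx, hag])]
      rw [insertBy_congr _
        (fun a b => decide (k1 a < k1 b) || (!decide (k1 b < k1 a) && decide (k2 a < k2 b))) x _ (by
          intro y hy
          have hyb : bad y = true :=
            (List.mem_filter.mp (((PySem.List.sorted2_perm _ _ _ _).mem_iff).mp hy)).2
          simp [hx, hyb, lexlt_eq])]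
      rw [← sorted2_snoc]
      simp [List.filter_append, hx]
    · have hxg : bad x = false := by simpa using hx
      rcases hS : PySem.List.sorted2 (l.filter bad) k1 k2 with _ | ⟨s, ss⟩
      · rw [List.append_nil, PySem.List.insertBy_of_forall_not_before _ _ _ (by
          intro y hy
          have hyg : bad y = false := by simpa using (List.mem_filter.mp hy).2
          simp [hxg, hyg])]
        simp [List.filter_append, hxg, hS]
      · have hsb : bad s = true := by
          have hmem : s ∈ PySem.List.sorted2 (l.filter bad) k1 k2 := by rw [hS]; simp
          exact (List.mem_filter.mp
            (((PySem.List.sorted2_perm (l.filter bad) k1 k2 false).mem_iff).mp hmem)).2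
        rw [insertBy_append_not _ _ _ _ (by
          intro a ha
          have hag : bad a = false := by simpa using (List.mem_filter.mp ha).2
          simp [hxg, hag])]
        rw [PySem.List.insertBy, if_pos (by simp [hxg, hsb])]
        simp [List.filter_append, hxg, hS]

-- ===== VERDICT (by name: the statement is the Claim_ definition above) =====
theorem adjust_for_health_conditions_spec : Claim_equal_adjust_for_health_conditions := by
  intro diet_plan health_conditions _
  unfold Spec_adjust_for_health_conditions
  by_cases hhc : health_conditions = []
  · simp [adjust_for_health_conditions, adjust_for_health_conditions_alt, hhc]
  · simp only [adjust_for_health_conditions, adjust_for_health_conditions_alt, if_neg hhc]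
    set d := (health_conditions.map PySem.Str.lower).contains "diabetes" with hd
    set c := (health_conditions.map PySem.Str.lower).contains "high cholesterol" with hc
    set bad : List (String × Int) → Bool := fun f =>
      (d && decide (pvGetv f "sugar" > 15)) || (c && decide (pvGetv f "fat" > 25)) with hbad
    -- B side: the two rank keys and the kept count
    have hk1 : (fun f => (pvRank d c f).1) = fun f => if bad f then (1 : Int) else 0 := by
      funext f; simp only [pvRank, hbad]; split <;> rfl
    have hk2 : (fun f => toLex (pvRank d c f).2)
        = fun f => toLex (if bad f then (pvGetv f "sugar", pvGetv f "fat") else ((0 : Int), (0 : Int))) := by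
      funext f; simp only [pvRank, hbad]; split <;> rfl
    have hkept : ((diet_plan.map (fun f => if (pvRank d c f).1 == 0 then (1 : Int) else 0)).sum)
        = ((diet_plan.countP (fun f => !bad f) : Nat) : Int) := by
      have hp : (fun f => (pvRank d c f).1 == 0) = fun f => !bad f := by
        funext f
        cases hB : (d && decide (pvGetv f "sugar" > 15)) || (c && decide (pvGetv f "fat" > 25)) with
        | true => simp [pvRank, hbad, hB]
        | false => simp [pvRank, hbad, hB]
      rw [show (fun (f : List (String × Int)) => if (pvRank d c f).1 == 0 then (1 : Int) else 0)
            = fun f => if (!bad f) then (1 : Int) else 0 from funext fun f => by rw [congrFun hp f]]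
      exact PySem.List.sum_map_ite_one_zero (fun f => !bad f) diet_plan
    rw [hk1, hk2, hkept, sortedSplit bad (fun f => pvGetv f "sugar") (fun f => pvGetv f "fat") diet_plan]
    -- A side: the loop is a filter, the removed list is the bad-filter, the top-up is a take
    rw [loopA_eq (fun food => d && decide (pvGetv food "sugar" > 15))
        (fun food => c && decide (pvGetv food "fat" > 25))]
    set G := diet_plan.filter (fun f => !bad f) with hG
    set S := PySem.List.sorted2 (diet_plan.filter bad) (fun f => pvGetv f "sugar") (fun f => pvGetv f "fat") with hS
    -- lengths
    have hGlen : G.length = diet_plan.countP (fun f => !bad f) := List.countP_eq_length_filter.symm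
    have hsum : G.length + (diet_plan.filter bad).length = diet_plan.length := by
      have := (List.length_eq_length_filter_add (l := diet_plan) bad).symm
      rw [hG]; omega
    have hSlen : S.length = (diet_plan.filter bad).length :=
      (PySem.List.sorted2_perm (diet_plan.filter bad) _ _ false).length_eq
    -- the slice bound
    have h0 : (0 : Int) ≤ max ((diet_plan.countP (fun f => !bad f) : Nat) : Int) (min 2 (diet_plan.length : Int)) := by
      omega
    rw [PySem.List.slice_to _ h0]
    by_cases hlt : G.length < 2
    · rw [if_pos hlt, removed_eq bad (fun f g hfg => by simp [hbad, pyDictEq_getv hfg]) diet_plan,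
        ← hS, pvFill_eq]
      rw [List.take_append]
      have hGt : G.take (max ((diet_plan.countP (fun f => !bad f) : Nat) : Int) (min 2 (diet_plan.length : Int))).toNat = G := by
        apply List.take_of_length_le; omega
      rw [hGt]
      congr 1
      by_cases hn : 2 ≤ diet_plan.length
      · have : (max ((diet_plan.countP (fun f => !bad f) : Nat) : Int) (min 2 (diet_plan.length : Int))).toNat - G.length = 2 - G.length := by
          omega
        rw [this]
      · have h1 : S.take ((max ((diet_plan.countP (fun f => !bad f) : Nat) : Int) (min 2 (diet_plan.length : Int))).toNat - G.length) = S := by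
          apply List.take_of_length_le; omega
        have h2 : S.take (2 - G.length) = S := by
          apply List.take_of_length_le; omega
        rw [h1, h2]
    · rw [if_neg hlt, List.take_append]
      have hGt : G.take (max ((diet_plan.countP (fun f => !bad f) : Nat) : Int) (min 2 (diet_plan.length : Int))).toNat = G := by
        apply List.take_of_length_le; omega
      have hSt : S.take ((max ((diet_plan.countP (fun f => !bad f) : Nat) : Int) (min 2 (diet_plan.length : Int))).toNat - G.length) = [] := by
        have : (max ((diet_plan.countP (fun f => !bad f) : Nat) : Int) (min 2 (diet_plan.length : Int))).toNat - G.length = 0 := by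
          omega
        rw [this, List.take_zero]
      rw [hGt, hSt, List.append_nil]
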